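-- pv_equiv track=rewrite | github.com/CubedCard/adventofcode | 2024/day-22/solution.py | calculate_pattern_scores
-- ===== SOURCE A (Python) =====
-- def process_number(x):
--     modulo = 16777216
--
--     result = x * 64
--     x ^= result
--     x %= modulo
--
--     result = x // 32
--     x ^= result
--     x %= modulo
--
--     result = x * 2048
--     x ^= result
--     x %= modulo
--
--     return x
--
-- def generate_sequence_and_diff(x, length):
--     sequence = []
--     differences = []
--
--     for _ in range(length):
--         current_digit = x % 10
--         x = process_number(x)
--         next_digit = x % 10
--
--         sequence.append(next_digit)
--         differences.append(next_digit - current_digit)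
--
--     return x, sequence, convert_to_string(differences)
--
-- def convert_to_string(differences):
--     return "".join([chr(i + ord('m')) for i in differences])
--
-- def calculate_pattern_scores(data, sequence_length):
--     pattern_scores = {}
--
--     for x in data:
--         _, sequence, differences = generate_sequence_and_diff(x, sequence_length)
--         seen_patterns = set()
--
--         for i in range(len(differences) - 3):
--             pattern = tuple(differences[i:i + 4])
--             next_point = sequence[i + 3]
--
--             if pattern not in seen_patterns:
--                 seen_patterns.add(pattern)
--                 if pattern not in pattern_scores:
--                     pattern_scores[pattern] = 0
--                 pattern_scores[pattern] += next_point
--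
--     return pattern_scores
-- ===== SOURCE B (Python) =====
-- def calculate_pattern_scores(data, sequence_length):
--     scores = {}
--     for x in data:
--         firsts = {}
--         window = ()
--         prev = x % 10
--         for _ in range(sequence_length):
--             x = (x ^ (x * 64)) % 16777216
--             x = (x ^ (x // 32)) % 16777216
--             x = (x ^ (x * 2048)) % 16777216
--             digit = x % 10
--             window = (window + (chr(digit - prev + ord('m')),))[-4:]
--             prev = digit
--             if len(window) == 4:
--                 firsts.setdefault(window, digit)
--         for pattern, price in firsts.items():
--             scores[pattern] = scores.get(pattern, 0) + price
--     return scores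
-- ===== Notes on version B (the rewrite author's own statement) =====
-- stated objective: alternative
-- what changed: B fuses everything into one streaming pass per number: it inlines the mining transform and maintains a rolling 4-tuple window of diff characters instead of materializing the full price list and diff string and re-slicing it, and it collects first-occurrence prices in a per-number dict via setdefault and merges it into the global scores afterwards, replacing A's seen-set plus in-place global updates.
import Mathlib
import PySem

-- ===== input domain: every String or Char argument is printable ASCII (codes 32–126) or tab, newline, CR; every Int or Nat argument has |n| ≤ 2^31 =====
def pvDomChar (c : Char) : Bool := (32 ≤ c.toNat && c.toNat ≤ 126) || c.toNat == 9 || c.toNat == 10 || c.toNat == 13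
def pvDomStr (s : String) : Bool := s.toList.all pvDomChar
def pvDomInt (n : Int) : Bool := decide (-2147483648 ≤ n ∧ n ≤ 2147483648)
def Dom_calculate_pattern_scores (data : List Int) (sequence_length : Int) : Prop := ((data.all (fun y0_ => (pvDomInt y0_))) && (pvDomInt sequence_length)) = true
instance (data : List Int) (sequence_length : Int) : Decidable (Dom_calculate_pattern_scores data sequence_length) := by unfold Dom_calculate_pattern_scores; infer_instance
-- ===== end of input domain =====

-- B fuses A's generate-then-scan into one streaming pass per number (rolling 4-window of diff chars,
-- per-number setdefault dict merged into the global scores): an alternative decomposition, same cost.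


-- ===== PORT A =====
def process_number (x : Int) : Int :=
  let modulo : Int := 16777216
  let result := x * 64
  let x := PySem.Int.bxor x result
  let x := PySem.Int.mod x modulo
  let result := PySem.Int.floordiv x 32
  let x := PySem.Int.bxor x result
  let x := PySem.Int.mod x modulo
  let result := x * 2048
  let x := PySem.Int.bxor x result
  let x := PySem.Int.mod x modulo
  x

-- "".join([chr(i + ord('m')) for i in differences]) — kept as a List Char (code points);
-- exact: every difference is in [-9, 9], so chr sees 100..118.
def convert_to_string (differences : List Int) : List Char :=
  differences.map (fun i => Char.ofNat (i + 109).toNat)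

def generate_sequence_and_diff (x : Int) (length : Int) : Int × List Int × List Char :=
  let st := (PySem.List.pyRange 0 length 1).foldl
    (fun (st : Int × List Int × List Int) _ =>
      let (x, sequence, differences) := st
      let current_digit := PySem.Int.mod x 10
      let x := process_number x
      let next_digit := PySem.Int.mod x 10
      (x, sequence ++ [next_digit], differences ++ [next_digit - current_digit]))
    (x, [], [])
  (st.1, st.2.1, convert_to_string st.2.2)

def calculate_pattern_scores (data : List Int) (sequence_length : Int) : List (List String × Int) :=
  let pattern_scores : PySem.Dict (List String) Int := PySem.Dict.empty
  let pattern_scores := data.foldl (fun pattern_scores x =>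
    let r := generate_sequence_and_diff x sequence_length
    let sequence := r.2.1
    let differences := r.2.2
    let seen_patterns : PySem.Set (List String) := PySem.Set.empty
    let st := (PySem.List.pyRange 0 ((differences.length : Int) - 3) 1).foldl
      (fun (st : PySem.Set (List String) × PySem.Dict (List String) Int) i =>
        let (seen_patterns, pattern_scores) := st
        -- tuple(differences[i:i+4]) : a tuple of 1-char strings
        let pattern := (PySem.List.slice differences (some i) (some (i + 4))).map String.singleton
        -- sequence[i+3] : always in range here (0 ≤ i < len - 3)
        let next_point := PySem.List.pyGetD sequence (i + 3) 0
        if !(PySem.Set.contains seen_patterns pattern) then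
          let seen_patterns := PySem.Set.add seen_patterns pattern
          let pattern_scores :=
            if !(pattern_scores.contains pattern) then pattern_scores.insert pattern 0 else pattern_scores
          (seen_patterns, pattern_scores.insert pattern (pattern_scores.getD pattern 0 + next_point))
        else (seen_patterns, pattern_scores))
      (seen_patterns, pattern_scores)
    st.2) pattern_scores
  pattern_scores.items

-- ===== PORT B =====
def calculate_pattern_scores_alt (data : List Int) (sequence_length : Int) : List (List String × Int) :=
  let scores : PySem.Dict (List String) Int := PySem.Dict.empty
  let scores := data.foldl (fun scores x =>
    let st := (PySem.List.pyRange 0 sequence_length 1).foldl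
      (fun (st : PySem.Dict (List String) Int × Int × List String × Int) _ =>
        let (firsts, x, window, prev) := st
        let x := PySem.Int.mod (PySem.Int.bxor x (x * 64)) 16777216
        let x := PySem.Int.mod (PySem.Int.bxor x (PySem.Int.floordiv x 32)) 16777216
        let x := PySem.Int.mod (PySem.Int.bxor x (x * 2048)) 16777216
        let digit := PySem.Int.mod x 10
        -- (window + (chr(digit - prev + ord('m')),))[-4:] ; chr exact: argument in 100..118
        let window := PySem.List.slice
          (window ++ [String.singleton (Char.ofNat (digit - prev + 109).toNat)]) (some (-4)) none
        let prev := digit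
        let firsts := if window.length = 4 then firsts.setdefault window digit else firsts
        (firsts, x, window, prev))
      (PySem.Dict.empty, x, [], PySem.Int.mod x 10)
    st.1.items.foldl (fun scores p => scores.insert p.1 (scores.getD p.1 0 + p.2)) scores) scores
  scores.items

-- ===== PRECONDITION & SPEC =====
def Spec_calculate_pattern_scores (data : List Int) (sequence_length : Int) (out : List (List String × Int)) : Prop := out = calculate_pattern_scores_alt data sequence_length
instance (data : List Int) (sequence_length : Int) (out : List (List String × Int)) : Decidable (Spec_calculate_pattern_scores data sequence_length out) := by unfold Spec_calculate_pattern_scores; infer_instance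

-- ===== CLAIM (what is proved, stated in full; the proofs are below) =====
def Claim_equal_calculate_pattern_scores : Prop := ∀ (data : List Int) (sequence_length : Int), Dom_calculate_pattern_scores data sequence_length → Spec_calculate_pattern_scores data sequence_length (calculate_pattern_scores data sequence_length)


-- ===== LEMMAS AND PROOFS =====

-- n-fold iteration (foldl over a loop that ignores the loop variable)
def pvIter {α : Type} (f : α → α) : Nat → α → α
  | 0, a => a
  | n + 1, a => pvIter f n (f a)

theorem pvFoldlIgnore {α β : Type} (f : α → α) (l : List β) (a : α) :
    l.foldl (fun s _ => f s) a = pvIter f l.length a := by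
  induction l generalizing a with
  | nil => rfl
  | cons x t ih => simp [pvIter, ih]

def pvChr (d : Int) : Char := Char.ofNat (d + 109).toNat

-- the stream of (price-diff, next-digit) pairs produced by iterating the mining transform
def pvGen (x : Int) : Nat → List (Int × Int)
  | 0 => []
  | n + 1 =>
    (PySem.Int.mod (process_number x) 10 - PySem.Int.mod x 10,
     PySem.Int.mod (process_number x) 10) :: pvGen (process_number x) n

def pvGenStep (st : Int × List Int × List Int) : Int × List Int × List Int :=
  match st with
  | (x, sequence, differences) =>
    let current_digit := PySem.Int.mod x 10
    let x := process_number x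
    let next_digit := PySem.Int.mod x 10
    (x, sequence ++ [next_digit], differences ++ [next_digit - current_digit])

theorem pvGenLoop (n : Nat) : ∀ (x : Int) (s d : List Int),
    pvIter pvGenStep n (x, s, d) =
      (pvIter process_number n x, s ++ (pvGen x n).map (·.2), d ++ (pvGen x n).map (·.1)) := by
  induction n with
  | zero => intro x s d; simp [pvIter, pvGen]
  | succ n ih => intro x s d; simp [pvIter, pvGen, pvGenStep, ih]

theorem pvGenerateEq (x len : Int) :
    generate_sequence_and_diff x len =
      (pvIter process_number len.toNat x,
       (pvGen x len.toNat).map (·.2),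
       (pvGen x len.toNat).map (fun p => pvChr p.1)) := by
  show (let st := (PySem.List.pyRange 0 len 1).foldl (fun s _ => pvGenStep s) (x, ([], []));
        (st.1, st.2.1, convert_to_string st.2.2)) = _
  rw [pvFoldlIgnore pvGenStep]
  simp [PySem.List.length_pyRange_one, pvGenLoop, convert_to_string, pvChr, Function.comp]

-- rolling window update:  (window + (c,))[-4:]
def pvRoll (w : List String) (s : String) : List String :=
  (w ++ [s]).drop ((w ++ [s]).length - 4)

-- the (pattern, price) events of B's streaming loop
def pvEvents : List String → List (Int × Int) → List (List String × Int)
  | _, [] => []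
  | w, p :: rest =>
    let w' := pvRoll w (String.singleton (pvChr p.1))
    (if w'.length = 4 then [(w', p.2)] else []) ++ pvEvents w' rest

def pvSetdef (F : PySem.Dict (List String) Int) (e : List String × Int) :
    PySem.Dict (List String) Int := F.setdefault e.1 e.2

def pvBStep (st : PySem.Dict (List String) Int × Int × List String × Int) :
    PySem.Dict (List String) Int × Int × List String × Int :=
  match st with
  | (firsts, x, window, prev) =>
    let x := PySem.Int.mod (PySem.Int.bxor x (x * 64)) 16777216
    let x := PySem.Int.mod (PySem.Int.bxor x (PySem.Int.floordiv x 32)) 16777216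
    let x := PySem.Int.mod (PySem.Int.bxor x (x * 2048)) 16777216
    let digit := PySem.Int.mod x 10
    let window := PySem.List.slice
      (window ++ [String.singleton (Char.ofNat (digit - prev + 109).toNat)]) (some (-4)) none
    let prev := digit
    let firsts := if window.length = 4 then firsts.setdefault window digit else firsts
    (firsts, x, window, prev)

theorem pvSliceRoll (w : List String) (s : String) :
    PySem.List.slice (w ++ [s]) (some (-4)) none = pvRoll w s := by
  rw [PySem.List.slice_from_neg_ofNat (w ++ [s]) 4 (by omega)]; rfl

theorem pvBLoop (n : Nat) : ∀ (F : PySem.Dict (List String) Int) (x : Int) (w : List String),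
    (pvIter pvBStep n (F, x, w, PySem.Int.mod x 10)).1 =
      (pvEvents w (pvGen x n)).foldl pvSetdef F := by
  induction n with
  | zero => intro F x w; simp [pvIter, pvGen, pvEvents]
  | succ n ih =>
    intro F x w
    show (pvIter pvBStep n (pvBStep (F, x, w, PySem.Int.mod x 10))).1 = _
    have hstep : pvBStep (F, x, w, PySem.Int.mod x 10) =
        (let w' := pvRoll w (String.singleton (pvChr (PySem.Int.mod (process_number x) 10 - PySem.Int.mod x 10)));
         ((if w'.length = 4 then F.setdefault w' (PySem.Int.mod (process_number x) 10) else F),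
          process_number x, w', PySem.Int.mod (process_number x) 10)) := by
      simp only [pvBStep, process_number, pvChr, pvSliceRoll]
    rw [hstep]
    simp only [ih, pvGen, pvEvents, List.foldl_append]
    split_ifs with h <;> simp [pvSetdef]


-- A's sliding 4-windows over the diff chars, with the matching prices
def pvSlide : List Char → List Int → List (List String × Int)
  | a :: b :: c :: d :: cr, ds =>
    (([a, b, c, d]).map String.singleton, ds.getD 3 0) :: pvSlide (b :: c :: d :: cr) ds.tail
  | _, _ => []
  termination_by cs _ => cs.length

theorem pvGetDSuccTail (ds : List Int) (k : Nat) : ds.getD (k + 1) 0 = ds.tail.getD k 0 := by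
  cases ds <;> rfl

theorem pvSlideEqMapRange : ∀ (cs : List Char) (ds : List Int),
    pvSlide cs ds = (List.range (cs.length - 3)).map
      (fun k => (((cs.drop k).take 4).map String.singleton, ds.getD (k + 3) 0)) := by
  intro cs ds
  induction cs, ds using pvSlide.induct with
  | case1 a b c d cr ds ih =>
    rw [pvSlide]
    have hl : (a :: b :: c :: d :: cr).length - 3 = cr.length + 1 := by simp
    rw [hl, List.range_succ_eq_map, List.map_cons]
    congr 1
    rw [ih, List.map_map]
    have hlen : (b :: c :: d :: cr).length - 3 = cr.length := by simp
    rw [hlen]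
    apply List.map_congr_left; intro k hk
    simp only [Function.comp, List.drop_succ_cons]
    conv_rhs => rw [show k + 3 + 1 = (k + 3) + 1 from rfl, pvGetDSuccTail]
  | case2 cs ds h =>
    rcases cs with _ | ⟨a, _ | ⟨b, _ | ⟨c, _ | ⟨d, cr⟩⟩⟩⟩ <;>
      first
        | exact absurd rfl (h _ _ _ _ _)
        | simp [pvSlide]


-- window shift: with a full window the oldest entry never matters
theorem pvRoll3 (w : List String) (hw : w.length = 3) (s : String) : pvRoll w s = w ++ [s] := by
  simp [pvRoll, hw]

theorem pvRoll4cons (a : String) (w : List String) (hw : w.length = 3) (s : String) :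
    pvRoll (a :: w) s = w ++ [s] := by
  simp [pvRoll, hw]

theorem pvEventsShift (a : String) (w : List String) (hw : w.length = 3) (l : List (Int × Int)) :
    pvEvents (a :: w) l = pvEvents w l := by
  cases l with
  | nil => rfl
  | cons p rest => simp [pvEvents, pvRoll3 w hw, pvRoll4cons a w hw]

theorem pvEventsFull : ∀ (gl : List (Int × Int)) (p1 p2 p3 : Int × Int),
    pvEvents [String.singleton (pvChr p1.1), String.singleton (pvChr p2.1),
              String.singleton (pvChr p3.1)] gl
      = pvSlide (pvChr p1.1 :: pvChr p2.1 :: pvChr p3.1 :: gl.map (fun p => pvChr p.1))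
                (p1.2 :: p2.2 :: p3.2 :: gl.map (·.2)) := by
  intro gl
  induction gl with
  | nil => intro p1 p2 p3; simp [pvEvents, pvSlide]
  | cons e rest ih =>
    intro p1 p2 p3
    rw [pvEvents]
    rw [pvRoll3 [String.singleton (pvChr p1.1), String.singleton (pvChr p2.1),
      String.singleton (pvChr p3.1)] rfl (String.singleton (pvChr e.1))]
    simp only [List.cons_append, List.nil_append]
    rw [pvEventsShift (String.singleton (pvChr p1.1)) [String.singleton (pvChr p2.1),
      String.singleton (pvChr p3.1), String.singleton (pvChr e.1)] rfl rest]
    rw [ih p2 p3 e]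
    simp [pvSlide]

theorem pvEventsEqSlide (gl : List (Int × Int)) :
    pvEvents [] gl = pvSlide (gl.map (fun p => pvChr p.1)) (gl.map (·.2)) := by
  match gl with
  | [] => simp [pvEvents, pvSlide]
  | [p] => simp [pvEvents, pvRoll, pvSlide]
  | [p, q] => simp [pvEvents, pvRoll, pvSlide]
  | [p, q, r] => simp [pvEvents, pvRoll, pvSlide]
  | p1 :: p2 :: p3 :: rest =>
    rw [pvEvents, pvEvents, pvEvents]
    rw [show pvRoll [] (String.singleton (pvChr p1.1)) = [String.singleton (pvChr p1.1)] from rfl]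
    rw [show pvRoll [String.singleton (pvChr p1.1)] (String.singleton (pvChr p2.1))
          = [String.singleton (pvChr p1.1), String.singleton (pvChr p2.1)] from rfl]
    rw [show pvRoll [String.singleton (pvChr p1.1), String.singleton (pvChr p2.1)]
          (String.singleton (pvChr p3.1))
          = [String.singleton (pvChr p1.1), String.singleton (pvChr p2.1),
             String.singleton (pvChr p3.1)] from rfl]
    rw [pvEventsFull rest p1 p2 p3]
    simp

-- the global-dict update both programs perform for one (pattern, price) event
def pvUpd (st : PySem.Set (List String) × PySem.Dict (List String) Int) (e : List String × Int) :
    PySem.Set (List String) × PySem.Dict (List String) Int :=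
  if (!PySem.Set.contains st.1 e.1) = true then
    (PySem.Set.add st.1 e.1,
     (if (!st.2.contains e.1) = true then st.2.insert e.1 0 else st.2).insert e.1
       ((if (!st.2.contains e.1) = true then st.2.insert e.1 0 else st.2).getD e.1 0 + e.2))
  else (st.1, st.2)

def pvMerge (S : PySem.Dict (List String) Int) (its : List (List String × Int)) :
    PySem.Dict (List String) Int :=
  its.foldl (fun scores p => scores.insert p.1 (scores.getD p.1 0 + p.2)) S

theorem pvSetContainsKeys (F : PySem.Dict (List String) Int) (p : List String) :
    PySem.Set.contains F.keys p = F.contains p := by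
  rcases F with ⟨l⟩
  simp only [PySem.Set.contains, PySem.Dict.contains, PySem.Dict.keys]
  induction l with
  | nil => rfl
  | cons q t ih =>
    simp_all [eq_comm]
    rw [show (p == q.1) = (q.1 == p) from by simp [eq_comm]]

theorem pvAddScoreStep (T : PySem.Dict (List String) Int) (p : List String) (v : Int) :
    (if !(T.contains p) then T.insert p 0 else T).insert p
      ((if !(T.contains p) then T.insert p 0 else T).getD p 0 + v)
    = T.insert p (T.getD p 0 + v) := by
  by_cases h : T.contains p
  · simp [h]
  · simp only [Bool.not_eq_true] at h
    simp [h, PySem.Dict.getD_insert_self, PySem.Dict.insert_insert_self,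
      PySem.Dict.getD_of_not_contains T 0 h]

theorem pvMergeLoop : ∀ (ev : List (List String × Int)) (F S : PySem.Dict (List String) Int),
    F.keys.Nodup →
    (ev.foldl pvUpd (F.keys, pvMerge S F.items)).2 = pvMerge S ((ev.foldl pvSetdef F).items) := by
  intro ev
  induction ev with
  | nil => intro F S _; rfl
  | cons e rest ih =>
    intro F S h
    simp only [List.foldl_cons]
    by_cases hc : F.contains e.1
    · have hsc : PySem.Set.contains F.keys e.1 = true := by rw [pvSetContainsKeys]; exact hc
      rw [show pvUpd (F.keys, pvMerge S F.items) e = (F.keys, pvMerge S F.items) by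
        simp only [pvUpd]; rw [hsc]; simp]
      rw [show pvSetdef F e = F from by simp [pvSetdef, PySem.Dict.setdefault_of_contains F e.2 hc]]
      exact ih F S h
    · simp only [Bool.not_eq_true] at hc
      have hsc : PySem.Set.contains F.keys e.1 = false := by rw [pvSetContainsKeys]; exact hc
      have h1 : pvUpd (F.keys, pvMerge S F.items) e
          = ((F.insert e.1 e.2).keys, pvMerge S (F.insert e.1 e.2).items) := by
        rw [PySem.Dict.keys_insert_of_not_contains F e.2 hc,
          PySem.Dict.items_insert_of_not_contains F e.2 hc]
        have hlc : List.contains F.keys e.1 = false := hsc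
        simp only [pvUpd]; rw [hsc]
        simp only [Bool.not_false, if_pos, Prod.mk.injEq]
        constructor
        · have hnm : e.1 ∉ F.keys := by simpa using hlc
          simp [PySem.Set.add, hnm]
        · rw [pvAddScoreStep]
          simp [pvMerge, List.foldl_append]
      rw [h1]
      rw [show pvSetdef F e = F.insert e.1 e.2 from by
        simp [pvSetdef, PySem.Dict.setdefault_of_not_contains F e.2 hc]]
      exact ih (F.insert e.1 e.2) S (PySem.Dict.nodup_keys_insert F e.1 e.2 h)


theorem pvSliceWin (cs : List Char) (y : Nat) :
    PySem.List.slice cs (some ((0:Int) + (y:Int))) (some ((0:Int) + (y:Int) + 4)) = (cs.drop y).take 4 := by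
  have h4 : (0:Int) + (y:Int) + 4 = ((y + 4 : Nat) : Int) := by push_cast; ring
  have h0 : (0:Int) + (y:Int) = ((y : Nat) : Int) := by ring
  rw [h4, h0, PySem.List.slice_natCast cs y (y + 4), Nat.add_sub_cancel_left]

theorem pvGetWin (ds : List Int) (y : Nat) :
    PySem.List.pyGetD ds ((0:Int) + (y:Int) + 3) 0 = ds.getD (y + 3) 0 := by
  have h3 : (0:Int) + (y:Int) + 3 = ((y + 3 : Nat) : Int) := by push_cast; ring
  rw [h3, PySem.List.pyGetD_natCast]

theorem pvUpdPair (st : PySem.Set (List String) × PySem.Dict (List String) Int)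
    (P : List String) (v : Int) :
    (if (!PySem.Set.contains st.1 P) = true then
       (PySem.Set.add st.1 P,
        (if (!st.2.contains P) = true then st.2.insert P 0 else st.2).insert P
          ((if (!st.2.contains P) = true then st.2.insert P 0 else st.2).getD P 0 + v))
     else (st.1, st.2))
    = pvUpd st (P, v) := rfl

theorem pvPerNumber (sl : Int) (S : PySem.Dict (List String) Int) (x : Int) :
    (let r := generate_sequence_and_diff x sl
     let sequence := r.2.1
     let differences := r.2.2
     let seen_patterns : PySem.Set (List String) := PySem.Set.empty
     let st := (PySem.List.pyRange 0 ((differences.length : Int) - 3) 1).foldl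
       (fun (st : PySem.Set (List String) × PySem.Dict (List String) Int) i =>
         let (seen_patterns, pattern_scores) := st
         let pattern := (PySem.List.slice differences (some i) (some (i + 4))).map String.singleton
         let next_point := PySem.List.pyGetD sequence (i + 3) 0
         if !(PySem.Set.contains seen_patterns pattern) then
           let seen_patterns := PySem.Set.add seen_patterns pattern
           let pattern_scores :=
             if !(pattern_scores.contains pattern) then pattern_scores.insert pattern 0 else pattern_scores
           (seen_patterns, pattern_scores.insert pattern (pattern_scores.getD pattern 0 + next_point))
         else (seen_patterns, pattern_scores))
       (seen_patterns, S)
     st.2)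
    =
    (let st := (PySem.List.pyRange 0 sl 1).foldl (fun st _ => pvBStep st)
       (PySem.Dict.empty, x, [], PySem.Int.mod x 10)
     st.1.items.foldl (fun scores p => scores.insert p.1 (scores.getD p.1 0 + p.2)) S) := by
  rw [pvGenerateEq]
  rw [pvFoldlIgnore pvBStep]
  rw [PySem.List.length_pyRange_one]
  have hn : (sl - 0).toNat = sl.toNat := by omega
  rw [hn]
  dsimp only
  rw [pvBLoop sl.toNat PySem.Dict.empty x []]
  -- B side is now  pvMerge S ((pvEvents [] (pvGen x sl.toNat)).foldl pvSetdef Dict.empty).items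
  show _ = pvMerge S ((pvEvents [] (pvGen x sl.toNat)).foldl pvSetdef PySem.Dict.empty).items
  rw [pvEventsEqSlide]
  -- A side
  simp only [List.length_map]
  rw [PySem.List.pyRange_one 0 (((pvGen x sl.toNat).length : Int) - 3)]
  rw [List.foldl_map]
  simp only [pvSliceWin, pvGetWin]
  simp only [pvUpdPair]
  rw [← List.foldl_map]
  have hm : (((pvGen x sl.toNat).length : Int) - 3 - 0).toNat
      = (List.map (fun p => pvChr p.1) (pvGen x sl.toNat)).length - 3 := by simp; omega
  rw [hm]
  rw [← pvSlideEqMapRange (List.map (fun p => pvChr p.1) (pvGen x sl.toNat))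
    (List.map (fun q => q.2) (pvGen x sl.toNat))]
  exact pvMergeLoop (pvSlide (List.map (fun p => pvChr p.1) (pvGen x sl.toNat))
    (List.map (fun q => q.2) (pvGen x sl.toNat))) PySem.Dict.empty S (by decide)



-- ===== VERDICT (by name: the statement is the Claim_ definition above) =====
theorem calculate_pattern_scores_spec : Claim_equal_calculate_pattern_scores := by
  intro data sequence_length _
  unfold Spec_calculate_pattern_scores calculate_pattern_scores calculate_pattern_scores_alt
  dsimp only
  congr 1
  refine PySem.List.foldl_congr_mem _ _ _ _ ?_
  intro S x _
  exact pvPerNumber sequence_length S x
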